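-- pv_equiv track=rewrite | github.com/po4yka/bite-size-reader | app/api/routers/auth/tokens.py | resolve_client_type
-- ===== SOURCE A (Python) =====
-- _CLIENT_TYPE_PREFIXES: tuple[tuple[str, str], ...] = (
--     ("cli", "cli"),
--     ("mcp", "mcp"),
--     ("automation", "automation"),
--     ("web", "web"),
--     ("mobile", "mobile"),
--     ("android", "mobile"),
--     ("ios", "mobile"),
--     ("admin", "admin"),
--     ("test", "test"),
-- )
--
-- def resolve_client_type(client_id: str | None) -> str:
--     """Return a coarse client type inferred from the client ID."""
--     if not client_id:
--         return "unknown"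
--
--     normalized = client_id.lower()
--     if normalized == "webapp":
--         return "web"
--
--     if normalized.count(".") >= 2 and all(
--         part.isidentifier() or part.isalnum() for part in normalized.split(".")
--     ):
--         return "mobile"
--
--     for prefix, client_type in _CLIENT_TYPE_PREFIXES:
--         if normalized == prefix:
--             return client_type
--         if any(normalized.startswith(f"{prefix}{separator}") for separator in ("-", "_", ".")):
--             return client_type
--
--     return "unknown"
-- ===== SOURCE B (Python) =====
-- _CLIENT_TYPE_MAP = {
--     "cli": "cli",
--     "mcp": "mcp",
--     "automation": "automation",
--     "web": "web",
--     "mobile": "mobile",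
--     "android": "mobile",
--     "ios": "mobile",
--     "admin": "admin",
--     "test": "test",
-- }
--
--
-- def _dotted_mobile(s):
--     """One char-level pass: count dots and validate every dot-separated part
--     (a part passes iff it is an identifier or purely alphanumeric)."""
--     dots = 0
--     ok = True
--     start = True        # at the start of a part
--     digitpart = False   # current part started with a digit
--     for ch in s:
--         if ch == ".":
--             dots += 1
--             if start:
--                 ok = False
--             start = True
--         elif start:
--             if not (ch.isalnum() or ch == "_"):
--                 ok = False
--             digitpart = ch.isdigit()
--             start = False
--         else:
--             if not (ch.isalnum() or (ch == "_" and not digitpart)):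
--                 ok = False
--     if start:
--         ok = False
--     return dots >= 2 and ok
--
--
-- def resolve_client_type(client_id):
--     """Return a coarse client type inferred from the client ID."""
--     if not client_id:
--         return "unknown"
--
--     normalized = client_id.lower()
--     if normalized == "webapp":
--         return "web"
--
--     if _dotted_mobile(normalized):
--         return "mobile"
--
--     cut = len(normalized)
--     for i, ch in enumerate(normalized):
--         if ch in "-_.":
--             cut = i
--             break
--     return _CLIENT_TYPE_MAP.get(normalized[:cut], "unknown")
-- ===== Notes on version B (the rewrite author's own statement) =====
-- stated objective: alternative
-- what changed: A's dotted-mobile guard (count, then split, then a per-part isidentifier/isalnum pass) becomes a single character-level state machine over the string, and A's linear scan of the 9-entry prefix table (equality plus three startswith probes per entry) becomes cutting the head token at the first separator and one dict lookup.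
import Mathlib
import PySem

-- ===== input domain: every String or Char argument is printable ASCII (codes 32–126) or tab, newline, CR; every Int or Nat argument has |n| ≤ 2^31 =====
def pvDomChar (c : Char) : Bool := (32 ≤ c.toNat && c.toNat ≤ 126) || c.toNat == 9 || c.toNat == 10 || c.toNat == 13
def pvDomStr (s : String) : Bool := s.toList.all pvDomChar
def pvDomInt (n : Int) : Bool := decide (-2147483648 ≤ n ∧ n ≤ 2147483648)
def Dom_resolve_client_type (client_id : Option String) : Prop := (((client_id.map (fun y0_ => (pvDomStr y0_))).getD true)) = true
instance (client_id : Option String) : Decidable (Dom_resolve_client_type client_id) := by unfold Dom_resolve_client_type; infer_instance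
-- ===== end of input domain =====

-- B replaces A's count+split+per-part scan of the dotted-mobile guard by a single character-level
-- state machine, and A's linear scan of the prefix table (three startswith probes per entry) by
-- cutting the head token at the first separator and one dict lookup (objective: alternative).

-- ===== PORT A =====
-- str.isidentifier(): exact on the ASCII domain (first char letter or '_', rest alnum or '_'; empty → False)
def pvIsIdent (cs : List Char) : Bool :=
  match cs with
  | [] => false
  | c :: rest => (PySem.Chars.isalpha c || c == '_') && rest.all (fun d => PySem.Chars.isalnum d || d == '_')

-- A's guard: normalized.count(".") >= 2 and all(part.isidentifier() or part.isalnum() for part in normalized.split("."))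
def pvMobileDotted (normalized : String) : Bool :=
  decide (2 ≤ PySem.Str.count normalized ".") &&
  (PySem.Chars.splitOn normalized.toList ['.']).all (fun part => pvIsIdent part || PySem.Chars.strIsalnum part)

def pvPrefixTable : List (String × String) :=
  [("cli", "cli"), ("mcp", "mcp"), ("automation", "automation"), ("web", "web"),
   ("mobile", "mobile"), ("android", "mobile"), ("ios", "mobile"), ("admin", "admin"), ("test", "test")]

def pvPrefixLoop (normalized : String) : List (String × String) → String
  | [] => "unknown"
  | (pfx, ctype) :: rest =>
    if normalized == pfx then ctype
    else if ["-", "_", "."].any (fun sep => PySem.Str.startswith normalized (pfx ++ sep)) then ctype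
    else pvPrefixLoop normalized rest

def resolve_client_type (client_id : Option String) : String :=
  match client_id with
  | none => "unknown"
  | some cid =>
    if cid == "" then "unknown"
    else
      let normalized := PySem.Str.lower cid
      if normalized == "webapp" then "web"
      else if pvMobileDotted normalized then "mobile"
      else pvPrefixLoop normalized pvPrefixTable

-- ===== PORT B =====
def pvClientTypeMap : PySem.Dict String String :=
  PySem.Dict.ofList
    [("cli", "cli"), ("mcp", "mcp"), ("automation", "automation"), ("web", "web"),
     ("mobile", "mobile"), ("android", "mobile"), ("ios", "mobile"), ("admin", "admin"), ("test", "test")]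

-- Source B's _dotted_mobile loop body; state = (dots, ok, start, digitpart)
def pvScan : List Char → Int × Bool × Bool × Bool → Int × Bool × Bool × Bool
  | [], st => st
  | c :: cs, (dots, ok, start, dp) =>
    if c == '.' then pvScan cs (dots + 1, ok && !start, true, dp)
    else if start then pvScan cs (dots, ok && (PySem.Chars.isalnum c || c == '_'), false, PySem.Chars.isdigit c)
    else pvScan cs (dots, ok && (PySem.Chars.isalnum c || (c == '_' && !dp)), false, dp)

def pvDottedB (s : String) : Bool :=
  let r := pvScan s.toList (0, true, true, false)
  let ok := if r.2.2.1 then false else r.2.1      -- `if start: ok = False`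
  decide (2 ≤ r.1) && ok

-- Source B's cut loop: index of the first separator, else len(s)
def pvCut : List Char → Nat
  | [] => 0
  | c :: cs => if c == '-' || c == '_' || c == '.' then 0 else pvCut cs + 1

def resolve_client_type_alt (client_id : Option String) : String :=
  match client_id with
  | none => "unknown"
  | some cid =>
    if cid == "" then "unknown"
    else
      let normalized := PySem.Str.lower cid
      if normalized == "webapp" then "web"
      else if pvDottedB normalized then "mobile"
      else
        -- normalized[:cut] with 0 ≤ cut ≤ len: exactly List.take
        pvClientTypeMap.getD (String.ofList (normalized.toList.take (pvCut normalized.toList))) "unknown"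

-- ===== PRECONDITION & SPEC =====
def Spec_resolve_client_type (client_id : Option String) (out : String) : Prop := out = resolve_client_type_alt client_id
instance (client_id : Option String) (out : String) : Decidable (Spec_resolve_client_type client_id out) := by unfold Spec_resolve_client_type; infer_instance

-- ===== CLAIM (what is proved, stated in full; the proofs are below) =====
def Claim_equal_resolve_client_type : Prop := ∀ (client_id : Option String), Dom_resolve_client_type client_id → Spec_resolve_client_type client_id (resolve_client_type client_id)

-- ===== LEMMAS AND PROOFS =====
-- "c is not a separator"
def pvQ (c : Char) : Bool := !(c == '-' || c == '_' || c == '.')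

-- Source B's head token s[:cut] is the maximal separator-free prefix
theorem pvCut_take (l : List Char) : l.take (pvCut l) = l.takeWhile pvQ := by
  induction l with
  | nil => rfl
  | cons c cs ih =>
    simp only [pvCut, List.takeWhile_cons, pvQ]
    by_cases h : (c == '-' || c == '_' || c == '.') = true <;> simp [h, ih]

theorem takeWhile_eq_iff (l p : List Char) (hp : p.all pvQ = true) :
    l.takeWhile pvQ = p ↔ (l = p ∨ ∃ s rest, pvQ s = false ∧ l = p ++ s :: rest) := by
  constructor
  · intro h
    rcases hd : l.dropWhile pvQ with _ | ⟨s, rest⟩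
    · left
      have := List.takeWhile_append_dropWhile (p := pvQ) (l := l)
      rw [h, hd] at this; simpa using this.symm
    · right
      refine ⟨s, rest, ?_, ?_⟩
      · have := List.head_dropWhile_not pvQ (l := l) (by simp [hd])
        simpa [hd] using this
      · have := List.takeWhile_append_dropWhile (p := pvQ) (l := l)
        rw [h, hd] at this; exact this.symm
  · rintro (rfl | ⟨s, rest, hs, rfl⟩)
    · exact List.takeWhile_eq_self_iff.mpr (List.all_eq_true.mp hp)
    · rw [List.takeWhile_append]
      have h1 : p.takeWhile pvQ = p := List.takeWhile_eq_self_iff.mpr (List.all_eq_true.mp hp)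
      simp [h1, hs]

-- A's per-prefix test equals "head token = prefix" (for a prefix with no separator chars)
theorem cond_eq (n p : String) (hp : p.toList.all pvQ = true) :
    ((n == p) || ["-", "_", "."].any (fun sep => PySem.Str.startswith n (p ++ sep)))
      = (n.toList.takeWhile pvQ == p.toList) := by
  rw [Bool.eq_iff_iff]
  simp only [Bool.or_eq_true, List.any_eq_true, beq_iff_eq, PySem.Str.startswith_eq,
    PySem.Chars.startswith_iff, List.mem_cons]
  rw [takeWhile_eq_iff n.toList p.toList hp]
  constructor
  · rintro (rfl | ⟨sep, hsep, hpre⟩)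
    · exact Or.inl rfl
    · right
      rcases hpre with ⟨t, ht⟩
      have hsl : ∃ s : Char, sep.toList = [s] ∧ pvQ s = false := by
        simp only [List.not_mem_nil, or_false] at hsep
        rcases hsep with rfl | rfl | rfl
        · exact ⟨'-', by decide, by decide⟩
        · exact ⟨'_', by decide, by decide⟩
        · exact ⟨'.', by decide, by decide⟩
      rcases hsl with ⟨s, hs1, hs2⟩
      refine ⟨s, t, hs2, ?_⟩
      have : (p ++ sep).toList = p.toList ++ [s] := by simp [hs1]
      rw [this] at ht
      rw [← ht]; simp
  · rintro (h | ⟨s, rest, hs, hl⟩)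
    · exact Or.inl (String.toList_inj.mp h)
    · right
      have hsep : s = '-' ∨ s = '_' ∨ s = '.' := by
        simp only [pvQ, Bool.not_eq_false', Bool.or_eq_true, beq_iff_eq] at hs
        tauto
      refine ⟨String.ofList [s], by rcases hsep with rfl | rfl | rfl <;> simp, ?_⟩
      refine ⟨rest, ?_⟩
      rw [hl]; simp

-- two sequential if-returns collapse to one disjunction
theorem if_if_or {α : Type} (a b : Bool) (x y : α) :
    (if a then x else if b then x else y) = (if (a || b) then x else y) := by
  cases a <;> cases b <;> simp

theorem key_comm (k : String) (hl : List Char) : (k == String.ofList hl) = (hl == k.toList) := by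
  rw [Bool.eq_iff_iff]
  simp only [beq_iff_eq]
  constructor
  · rintro rfl; simp
  · rintro rfl; simp

theorem pvPrefixLoop_cons (n pfx ct : String) (rest : List (String × String))
    (hp : pfx.toList.all pvQ = true) :
    pvPrefixLoop n ((pfx, ct) :: rest)
      = if n.toList.takeWhile pvQ == pfx.toList then ct else pvPrefixLoop n rest := by
  show (if n == pfx then ct
        else if ["-", "_", "."].any (fun sep => PySem.Str.startswith n (pfx ++ sep)) then ct
        else pvPrefixLoop n rest) = _
  rw [if_if_or, cond_eq n pfx hp]

set_option maxRecDepth 4096 in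
set_option maxHeartbeats 1000000 in
theorem loop_eq_getD (n : String) :
    pvPrefixLoop n pvPrefixTable
      = pvClientTypeMap.getD (String.ofList (n.toList.take (pvCut n.toList))) "unknown" := by
  rw [pvCut_take]
  have hmk : pvClientTypeMap = PySem.Dict.mk
    [("cli", "cli"), ("mcp", "mcp"), ("automation", "automation"), ("web", "web"),
     ("mobile", "mobile"), ("android", "mobile"), ("ios", "mobile"), ("admin", "admin"), ("test", "test")] := by
    rfl
  rw [hmk]
  show pvPrefixLoop n
    [("cli", "cli"), ("mcp", "mcp"), ("automation", "automation"), ("web", "web"),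
     ("mobile", "mobile"), ("android", "mobile"), ("ios", "mobile"), ("admin", "admin"), ("test", "test")] = _
  rw [pvPrefixLoop_cons n "cli" _ _ (by decide), pvPrefixLoop_cons n "mcp" _ _ (by decide),
      pvPrefixLoop_cons n "automation" _ _ (by decide), pvPrefixLoop_cons n "web" _ _ (by decide),
      pvPrefixLoop_cons n "mobile" _ _ (by decide), pvPrefixLoop_cons n "android" _ _ (by decide),
      pvPrefixLoop_cons n "ios" _ _ (by decide), pvPrefixLoop_cons n "admin" _ _ (by decide),
      pvPrefixLoop_cons n "test" _ _ (by decide)]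
  simp only [PySem.Dict.getD, PySem.Dict.get?_mk_cons, key_comm]
  have hnil : (PySem.Dict.mk ([] : List (String × String))).get? (String.ofList (n.toList.takeWhile pvQ)) = none := rfl
  rw [hnil]
  simp only [apply_ite (fun o : Option String => o.getD "unknown"), Option.getD_some, Option.getD_none]
  rfl

-- ==== the dotted-mobile guard: A's split-based test = B's state machine ====

-- reference splitter: PySem's splitOn at separator ['.'], with an accumulator
def pvSplit : List Char → List Char → List (List Char)
  | cur, [] => [cur]
  | cur, c :: rest => if c == '.' then cur :: pvSplit [] rest else pvSplit (cur ++ [c]) rest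

theorem go_split_spec : ∀ (fuel : Nat) (l cur : List Char) (acc : List (List Char)),
    l.length < fuel →
    PySem.Chars.splitOn.go ['.'] fuel l cur acc = acc.reverse ++ pvSplit cur.reverse l := by
  intro fuel
  induction fuel with
  | zero => intro l cur acc h; omega
  | succ fuel ih =>
    intro l cur acc h
    cases l with
    | nil => simp [PySem.Chars.splitOn.go, pvSplit]
    | cons c rest =>
      by_cases hc : c = '.'
      · subst hc
        rw [PySem.Chars.splitOn.go]
        simp only [List.isPrefixOf, beq_self_eq_true, Bool.true_and, if_true]
        rw [ih _ _ _ (by simpa using Nat.lt_of_succ_lt_succ h)]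
        simp [pvSplit]
      · rw [PySem.Chars.splitOn.go]
        have hpre : (['.'].isPrefixOf (c :: rest)) = false := by
          simp [List.isPrefixOf]
          exact fun h' => hc h'.symm
        rw [hpre]
        simp only [Bool.false_eq_true, if_false]
        rw [ih _ _ _ (by simpa using Nat.lt_of_succ_lt_succ h)]
        simp [pvSplit, hc]

theorem splitOn_dot (l : List Char) : PySem.Chars.splitOn l ['.'] = pvSplit [] l := by
  have := go_split_spec (l.length + 1) l [] [] (by omega)
  simpa [PySem.Chars.splitOn] using this

theorem go_count_spec : ∀ (fuel : Nat) (l : List Char) (acc : Nat),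
    l.length ≤ fuel →
    PySem.Chars.count.go ['.'] fuel l acc = acc + l.count '.' := by
  intro fuel
  induction fuel with
  | zero =>
    intro l acc h
    have : l = [] := List.length_eq_zero_iff.mp (Nat.le_zero.mp h)
    subst this; simp [PySem.Chars.count.go]
  | succ fuel ih =>
    intro l acc h
    cases l with
    | nil => simp [PySem.Chars.count.go]
    | cons c rest =>
      by_cases hc : c = '.'
      · subst hc
        rw [PySem.Chars.count.go]
        simp only [List.isPrefixOf, beq_self_eq_true, Bool.true_and, if_true]
        rw [ih _ _ (by simpa using Nat.le_of_succ_le_succ h)]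
        simp
        omega
      · rw [PySem.Chars.count.go]
        have hpre : (['.'].isPrefixOf (c :: rest)) = false := by
          simp [List.isPrefixOf]
          exact fun h' => hc h'.symm
        rw [hpre]
        simp only [Bool.false_eq_true, if_false]
        rw [ih _ _ (by simpa using Nat.le_of_succ_le_succ h)]
        simp [hc]

theorem count_dot (s : String) : PySem.Str.count s "." = s.toList.count '.' := by
  rw [PySem.Str.count_eq]
  show PySem.Chars.count s.toList ['.'] = _
  rw [PySem.Chars.count]
  simp only [List.isEmpty_cons, Bool.false_eq_true, if_false]
  rw [go_count_spec _ _ _ (le_refl _)]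
  simp

-- character-code facts of the literals used below
theorem char_lits : ('0':Char).val.toNat = 48 ∧ ('9':Char).val.toNat = 57 ∧ ('A':Char).val.toNat = 65 ∧ ('Z':Char).val.toNat = 90 ∧ ('a':Char).val.toNat = 97 ∧ ('z':Char).val.toNat = 122 := by decide

-- a digit is neither a letter nor '_'
theorem digit_not_alpha (c : Char) (h : PySem.Chars.isdigit c = true) :
    PySem.Chars.isalpha c = false ∧ (c == '_') = false := by
  simp only [PySem.Chars.isdigit, Bool.and_eq_true, decide_eq_true_eq] at h
  obtain ⟨h0, h9⟩ := h
  rw [Char.le_def, UInt32.le_iff_toNat_le] at h0 h9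
  obtain ⟨e1, e2, e3, e4, e5, e6⟩ := char_lits
  refine ⟨?_, ?_⟩
  · simp only [PySem.Chars.isalpha, PySem.Chars.isupper, PySem.Chars.islower,
      Bool.or_eq_false_iff, Bool.and_eq_false_iff, decide_eq_false_iff_not, Char.le_def,
      UInt32.le_iff_toNat_le]
    constructor <;> left <;> omega
  · simp only [beq_eq_false_iff_ne, ne_eq]
    rintro rfl
    simp at h9

-- the accumulated per-part factor of the machine = A's "isidentifier or isalnum"
theorem scanPart_eq (c : Char) (cs : List Char) :
    ((PySem.Chars.isalnum c || c == '_') &&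
      cs.all (fun d => PySem.Chars.isalnum d || (d == '_' && !PySem.Chars.isdigit c)))
      = (pvIsIdent (c :: cs) || PySem.Chars.strIsalnum (c :: cs)) := by
  by_cases hd : PySem.Chars.isdigit c = true
  · obtain ⟨ha, hu⟩ := digit_not_alpha c hd
    simp only [pvIsIdent, PySem.Chars.strIsalnum, PySem.Chars.isalnum, ha, hu, hd,
      List.isEmpty_cons, List.all_cons, Bool.not_true, Bool.and_false, Bool.or_false,
      Bool.false_or, Bool.false_and, Bool.not_false, Bool.true_and]
    rfl
  · have hd' : PySem.Chars.isdigit c = false := by simpa using hd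
    have hiso : ∀ d : Char, (PySem.Chars.isalnum d || (d == '_' && !PySem.Chars.isdigit c))
        = (PySem.Chars.isalnum d || d == '_') := by
      intro d; simp [hd']
    have hcalnum : PySem.Chars.isalnum c = PySem.Chars.isalpha c := by
      simp [PySem.Chars.isalnum, hd']
    simp only [hiso, hcalnum, pvIsIdent, PySem.Chars.strIsalnum, List.isEmpty_cons,
      List.all_cons, Bool.not_false, Bool.true_and]
    rw [Bool.eq_iff_iff]
    simp only [Bool.and_eq_true, Bool.or_eq_true, List.all_eq_true]
    constructor
    · rintro ⟨h1, h2⟩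
      exact Or.inl ⟨h1, h2⟩
    · rintro (⟨h1, h2⟩ | ⟨h1, h2⟩)
      · exact ⟨h1, h2⟩
      · exact ⟨Or.inl h1, fun d hdm => Or.inl (h2 d hdm)⟩

-- the first element surviving dropWhile fails the predicate
theorem dropWhile_head_false {p : Char → Bool} : ∀ (l r : List Char) (a : Char),
    l.dropWhile p = a :: r → p a = false := by
  intro l
  induction l with
  | nil => intro r a h; simp at h
  | cons x xs ih =>
    intro r a h
    by_cases hx : p x = true
    · rw [List.dropWhile_cons_of_pos hx] at h
      exact ih _ _ h
    · rw [List.dropWhile_cons_of_neg hx] at h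
      obtain ⟨rfl, -⟩ := List.cons.inj h
      simpa using hx

-- machine in mid-part state over separator-free characters
theorem scan_mid (cs : List Char) (hcs : '.' ∉ cs) :
    ∀ (rest : List Char) (dots : Int) (ok dp : Bool),
    pvScan (cs ++ rest) (dots, ok, false, dp)
      = pvScan rest (dots, ok && cs.all (fun d => PySem.Chars.isalnum d || (d == '_' && !dp)), false, dp) := by
  induction cs with
  | nil => intro rest dots ok dp; simp
  | cons c cs' ih =>
    intro rest dots ok dp
    have hc : (c == '.') = false := by
      simp only [beq_eq_false_iff_ne, ne_eq]
      exact fun h => hcs (h ▸ List.mem_cons_self)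
    simp only [List.cons_append, pvScan, hc, Bool.false_eq_true, if_false]
    rw [ih (fun h => hcs (List.mem_cons_of_mem _ h))]
    simp [Bool.and_assoc]

theorem pvSplit_nodot (cur l : List Char) (h : '.' ∉ l) : pvSplit cur l = [cur ++ l] := by
  induction l generalizing cur with
  | nil => simp [pvSplit]
  | cons c rest ih =>
    have hc : (c == '.') = false := by
      simp only [beq_eq_false_iff_ne, ne_eq]
      exact fun hh => h (hh ▸ List.mem_cons_self)
    simp only [pvSplit, hc, Bool.false_eq_true, if_false]
    rw [ih _ (fun hh => h (List.mem_cons_of_mem _ hh))]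
    simp

theorem pvSplit_app (cur a b : List Char) (h : '.' ∉ a) :
    pvSplit cur (a ++ '.' :: b) = (cur ++ a) :: pvSplit [] b := by
  induction a generalizing cur with
  | nil => simp [pvSplit]
  | cons c rest ih =>
    have hc : (c == '.') = false := by
      simp only [beq_eq_false_iff_ne, ne_eq]
      exact fun hh => h (hh ▸ List.mem_cons_self)
    simp only [List.cons_append, pvSplit, hc, Bool.false_eq_true, if_false]
    rw [ih _ (fun hh => h (List.mem_cons_of_mem _ hh))]
    simp

def pvAllParts (l : List Char) : Bool :=
  (pvSplit [] l).all (fun part => pvIsIdent part || PySem.Chars.strIsalnum part)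

theorem scan_main : ∀ (n : Nat) (l : List Char), l.length ≤ n → ∀ (dots : Int) (ok dp : Bool),
    (pvScan l (dots, ok, true, dp)).1 = dots + (l.count '.' : Int) ∧
    ((if (pvScan l (dots, ok, true, dp)).2.2.1 then false else (pvScan l (dots, ok, true, dp)).2.1)
      = (ok && pvAllParts l)) := by
  intro n
  induction n with
  | zero =>
    intro l h dots ok dp
    have hl : l = [] := List.length_eq_zero_iff.mp (Nat.le_zero.mp h)
    subst hl
    exact ⟨by simp [pvScan], by simp [pvScan, pvAllParts, pvSplit, pvIsIdent, PySem.Chars.strIsalnum]⟩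
  | succ n ih =>
    intro l h dots ok dp
    cases l with
    | nil =>
      exact ⟨by simp [pvScan], by simp [pvScan, pvAllParts, pvSplit, pvIsIdent, PySem.Chars.strIsalnum]⟩
    | cons c cs =>
      by_cases hc : c = '.'
      · subst hc
        have hstep : pvScan ('.' :: cs) (dots, ok, true, dp) = pvScan cs (dots + 1, false, true, dp) := by
          simp [pvScan]
        obtain ⟨ih1, ih2⟩ := ih cs (by simpa using Nat.le_of_succ_le_succ h) (dots + 1) false dp
        refine ⟨?_, ?_⟩
        · rw [hstep, ih1]
          simp
          ring
        · rw [hstep, ih2]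
          simp [pvAllParts, pvSplit, pvIsIdent, PySem.Chars.strIsalnum]
      · have hcb : (c == '.') = false := by simp [hc]
        have hsplitcs : cs.takeWhile (fun d => !(d == '.')) ++ cs.dropWhile (fun d => !(d == '.')) = cs :=
          List.takeWhile_append_dropWhile
        have hnod : '.' ∉ cs.takeWhile (fun d => !(d == '.')) := by
          intro hm
          have := List.mem_takeWhile_imp hm
          simp at this
        have hstep : pvScan (c :: cs) (dots, ok, true, dp)
            = pvScan cs (dots, ok && (PySem.Chars.isalnum c || c == '_'), false, PySem.Chars.isdigit c) := by
          simp [pvScan, hcb]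
        have hmid := scan_mid (cs.takeWhile (fun d => !(d == '.'))) hnod
          (cs.dropWhile (fun d => !(d == '.'))) dots
          (ok && (PySem.Chars.isalnum c || c == '_')) (PySem.Chars.isdigit c)
        rw [hsplitcs] at hmid
        have hfac : ((ok && (PySem.Chars.isalnum c || c == '_')) &&
              (cs.takeWhile (fun d => !(d == '.'))).all
                (fun d => PySem.Chars.isalnum d || (d == '_' && !PySem.Chars.isdigit c)))
            = (ok && (pvIsIdent (c :: cs.takeWhile (fun d => !(d == '.')))
                || PySem.Chars.strIsalnum (c :: cs.takeWhile (fun d => !(d == '.'))))) := by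
          rw [Bool.and_assoc]
          exact congrArg (fun bb => ok && bb) (scanPart_eq c _)
        rcases hr : cs.dropWhile (fun d => !(d == '.')) with _ | ⟨r0, b⟩
        · -- no dot anywhere in l
          rw [hr] at hmid
          have hcseq : cs.takeWhile (fun d => !(d == '.')) = cs := by
            rw [hr] at hsplitcs
            simpa using hsplitcs
          have hnodcs : '.' ∉ cs := hcseq ▸ hnod
          have hnotmem : '.' ∉ c :: cs := by
            intro hm
            rcases List.mem_cons.mp hm with hh | hh
            · exact hc hh.symm
            · exact hnodcs hh
          refine ⟨?_, ?_⟩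
          · rw [hstep, hmid]
            simp [pvScan, List.count_eq_zero.mpr hnotmem]
          · rw [hstep, hmid]
            simp only [pvScan, Bool.false_eq_true, if_false]
            rw [hfac]
            have hap : pvAllParts (c :: cs)
                = (pvIsIdent (c :: cs) || PySem.Chars.strIsalnum (c :: cs)) := by
              unfold pvAllParts
              rw [pvSplit_nodot [] (c :: cs) hnotmem]
              simp
            rw [hap, hcseq]
        · have hr0 : r0 = '.' := by
            have := dropWhile_head_false cs b r0 hr
            simpa using this
          subst hr0
          have hcs' : cs = cs.takeWhile (fun d => !(d == '.')) ++ '.' :: b := by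
            conv_lhs => rw [← hsplitcs, hr]
          have hcseq : c :: cs = (c :: cs.takeWhile (fun d => !(d == '.'))) ++ '.' :: b := by
            simpa using congrArg (List.cons c) hcs'
          have hnotmem : '.' ∉ c :: cs.takeWhile (fun d => !(d == '.')) := by
            intro hm
            rcases List.mem_cons.mp hm with hh | hh
            · exact hc hh.symm
            · exact hnod hh
          have hblen : b.length ≤ n := by
            have h2 := congrArg List.length hcseq
            simp at h2
            simp at h
            omega
          obtain ⟨ih1, ih2⟩ := ih b hblen (dots + 1)
            ((ok && (PySem.Chars.isalnum c || c == '_')) &&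
              (cs.takeWhile (fun d => !(d == '.'))).all
                (fun d => PySem.Chars.isalnum d || (d == '_' && !PySem.Chars.isdigit c)))
            (PySem.Chars.isdigit c)
          rw [hr] at hmid
          have hdotstep : pvScan ('.' :: b)
              (dots, (ok && (PySem.Chars.isalnum c || c == '_')) &&
                (cs.takeWhile (fun d => !(d == '.'))).all
                  (fun d => PySem.Chars.isalnum d || (d == '_' && !PySem.Chars.isdigit c)),
               false, PySem.Chars.isdigit c)
              = pvScan b (dots + 1,
                  (ok && (PySem.Chars.isalnum c || c == '_')) &&
                    (cs.takeWhile (fun d => !(d == '.'))).all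
                      (fun d => PySem.Chars.isalnum d || (d == '_' && !PySem.Chars.isdigit c)),
                  true, PySem.Chars.isdigit c) := by
            simp [pvScan]
          have hcount : ((c :: cs).count '.' : Int) = 1 + (b.count '.' : Int) := by
            have h0 : (c :: cs).count '.' = 1 + b.count '.' := by
              rw [hcseq, List.count_append, List.count_eq_zero.mpr hnotmem]
              simp
              omega
            rw [h0]
            push_cast
            ring
          have hparts : pvAllParts (c :: cs)
              = ((pvIsIdent (c :: cs.takeWhile (fun d => !(d == '.')))
                    || PySem.Chars.strIsalnum (c :: cs.takeWhile (fun d => !(d == '.'))))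
                  && pvAllParts b) := by
            unfold pvAllParts
            rw [hcseq, pvSplit_app [] _ b hnotmem]
            simp
          refine ⟨?_, ?_⟩
          · rw [hstep, hmid, hdotstep, ih1, hcount]
            ring
          · rw [hstep, hmid, hdotstep, ih2, hparts, hfac]
            simp [Bool.and_assoc]

-- B's machine result = A's guard
theorem dotted_eq (s : String) : pvDottedB s = pvMobileDotted s := by
  obtain ⟨h1, h2⟩ := scan_main s.toList.length s.toList (le_refl _) 0 true false
  unfold pvDottedB pvMobileDotted
  rw [count_dot, splitOn_dot]
  have hall : pvAllParts s.toList
      = (pvSplit [] s.toList).all (fun part => pvIsIdent part || PySem.Chars.strIsalnum part) := rfl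
  rw [← hall]
  simp only [h1, Bool.true_and] at h2 ⊢
  rw [h2]
  have hcnt : (decide (2 ≤ (0 : Int) + (s.toList.count '.' : Int))) = decide (2 ≤ s.toList.count '.') := by
    rw [decide_eq_decide]
    omega
  rw [hcnt]

-- ===== VERDICT (by name: the statement is the Claim_ definition above) =====
theorem resolve_client_type_spec : Claim_equal_resolve_client_type := by
  intro client_id _
  unfold Spec_resolve_client_type resolve_client_type resolve_client_type_alt
  cases client_id with
  | none => rfl
  | some cid =>
    by_cases h0 : (cid == "") = true
    · simp [h0]
    · simp only [h0, Bool.false_eq_true, if_false]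
      by_cases h1 : (PySem.Str.lower cid == "webapp") = true
      · simp [h1]
      · simp only [h1, Bool.false_eq_true, if_false]
        rw [dotted_eq]
        by_cases h2 : pvMobileDotted (PySem.Str.lower cid) = true
        · simp [h2]
        · simp only [h2, Bool.false_eq_true, if_false]
          exact loop_eq_getD _
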